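-- pv_equiv track=rewrite | github.com/cns-iu/myaura | include/utils.py | addSpacesBetweenHashTags
-- ===== SOURCE A (Python) =====
-- def addSpacesBetweenHashTags(text):
--     """ Add spaces between hastags: #i#love#newyork -> #i #love #newyork """
--     if len(text) == 0:
--         return ''
--
--     # Add spaces if hashtags are togerther
--     new_text = ''
--     for i, c in enumerate(text, start=0):
--         if (c in ['#', '@']) and (i > 0):
--             if text[i - 1] != ' ':
--                 new_text += ' '
--         new_text += c
--     return new_text
-- ===== SOURCE B (Python) =====
-- def addSpacesBetweenHashTags(text):
--     """ Add spaces between hastags: #i#love#newyork -> #i #love #newyork """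
--     # Stage 1: tokenize into chunks; every '#'/'@' (except a leading one) starts a new chunk.
--     parts = [[]]
--     for c in text:
--         if c in '#@' and parts[-1]:
--             parts.append([c])
--         else:
--             parts[-1].append(c)
--     chunks = [''.join(p) for p in parts]
--     # Stage 2: join the chunks, inserting a space unless the text already has one there.
--     out = [chunks[0]]
--     for chunk in chunks[1:]:
--         if not out[-1].endswith(' '):
--             out.append(' ')
--         out.append(chunk)
--     return ''.join(out)
-- ===== Notes on version B (the rewrite author's own statement) =====
-- stated objective: alternative
-- what changed: Replaces A's single indexed pass (which consults text[i-1] and splices spaces into a growing string) with a two-stage tokenize-and-join algorithm: stage 1 cuts the text into a list of chunks, each non-leading '#'/'@' starting a new chunk regardless of context; stage 2 joins the chunk list with ''.join, inserting a space only when the previously emitted chunk does not already end with one.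
import Mathlib
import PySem

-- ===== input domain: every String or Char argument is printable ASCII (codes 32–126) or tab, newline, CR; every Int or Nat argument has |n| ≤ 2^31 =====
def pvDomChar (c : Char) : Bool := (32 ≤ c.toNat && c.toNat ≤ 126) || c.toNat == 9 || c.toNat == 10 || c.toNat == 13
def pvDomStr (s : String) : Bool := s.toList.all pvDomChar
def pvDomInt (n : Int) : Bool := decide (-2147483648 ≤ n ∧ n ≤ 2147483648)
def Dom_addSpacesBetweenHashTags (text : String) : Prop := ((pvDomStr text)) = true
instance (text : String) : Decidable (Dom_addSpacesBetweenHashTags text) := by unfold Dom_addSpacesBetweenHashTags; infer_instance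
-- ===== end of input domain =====

-- B tokenizes the text into marker-started chunks and then joins the chunk list with
-- conditional spaces (a two-stage tokenize-and-join alternative; same O(n) cost).

-- ===== PORT A =====
-- literal port of A's enumerate loop; the string accumulator is carried as List Char
-- (Python '+=' on str = append), String.mk at the end.
def addSpacesBetweenHashTags (text : String) : String :=
  if text.length == 0 then "" else
    let cs := text.toList
    let newText :=
      (PySem.List.enumerate cs 0).foldl (fun acc ic =>
        let i := ic.1
        let c := ic.2
        let acc := if (c == '#' || c == '@') && decide (0 < i) then
            (if PySem.List.pyGet? cs (i - 1) ≠ some ' ' then acc ++ [' '] else acc)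
          else acc
        acc ++ [c]) []
    String.mk newText

-- ===== PORT B =====
-- port of Source B (strings kept as List Char): stage 1 builds the chunk list
-- (parts[-1] → getLastD, parts[-1].append(c) → dropLast ++ [last ++ [c]], truthiness of
-- parts[-1] → ≠ []); ''.join over a list of chars is the char list itself, so chunks := parts;
-- stage 2: out[-1].endswith(' ') is exactly "last char of out[-1] is ' '" (false for '');
-- ''.join(out) → out.flatten.
def addSpacesBetweenHashTags_alt (text : String) : String :=
  let parts := text.toList.foldl (fun parts c =>
      if (c == '#' || c == '@') && parts.getLastD [] != ([] : List Char) then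
        parts ++ [[c]]
      else
        parts.dropLast ++ [parts.getLastD [] ++ [c]]) [([] : List Char)]
  let chunks := parts
  let out := chunks.tail.foldl (fun out chunk =>
      (if (out.getLastD []).getLast? != some ' ' then out ++ [[' ']] else out) ++ [chunk])
      [chunks.headD []]
  String.mk out.flatten

-- ===== PRECONDITION & SPEC =====
def Spec_addSpacesBetweenHashTags (text : String) (out : String) : Prop := out = addSpacesBetweenHashTags_alt text
instance (text : String) (out : String) : Decidable (Spec_addSpacesBetweenHashTags text out) := by unfold Spec_addSpacesBetweenHashTags; infer_instance

-- ===== CLAIM (what is proved, stated in full; the proofs are below) =====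
def Claim_equal_addSpacesBetweenHashTags : Prop := ∀ (text : String), Dom_addSpacesBetweenHashTags text → Spec_addSpacesBetweenHashTags text (addSpacesBetweenHashTags text)

-- ===== LEMMAS AND PROOFS =====

-- common pairwise form: given the previous character p, emit each c with a space when needed
def pvCore : Char → List Char → List Char
  | _, [] => []
  | p, c :: rest =>
      (if (c == '#' || c == '@') && p != ' ' then [' ', c] else [c]) ++ pvCore c rest

-- specification of B's stage 1 on the tail of the text: (continuation of the current
-- chunk, list of marker-started chunks)
def pvChunkTail : List Char → List Char × List (List Char)
  | [] => ([], [])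
  | c :: r =>
      let fc := pvChunkTail r
      if c == '#' || c == '@' then ([], (c :: fc.1) :: fc.2) else (c :: fc.1, fc.2)

-- B's stage-1 fold, started at a state whose last chunk cur is nonempty, appends
-- pvChunkTail's continuation to cur and then the marker-started chunks
theorem chunk_fold (t : List Char) : ∀ (pref : List (List Char)) (cur : List Char), cur ≠ [] →
    t.foldl (fun parts c =>
      if (c == '#' || c == '@') && parts.getLastD [] != ([] : List Char) then
        parts ++ [[c]]
      else
        parts.dropLast ++ [parts.getLastD [] ++ [c]]) (pref ++ [cur])
    = pref ++ [cur ++ (pvChunkTail t).1] ++ (pvChunkTail t).2 := by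
  induction t with
  | nil => intro pref cur _; simp [pvChunkTail]
  | cons c r ih =>
    intro pref cur hcur
    simp only [List.foldl_cons]
    have hlast : (pref ++ [cur]).getLastD [] = cur := by simp
    have hdrop : (pref ++ [cur]).dropLast = pref := by simp
    by_cases hm : (c == '#' || c == '@') = true
    · have hne : (cur != ([] : List Char)) = true := by simpa using hcur
      rw [hlast, hdrop]
      simp only [hm, hne, Bool.and_self, if_true]
      have := ih (pref ++ [cur]) [c] (by simp)
      rw [this]
      simp [pvChunkTail, hm]
    · rw [hlast, hdrop]
      simp only [hm, Bool.false_and, Bool.false_eq_true, if_false]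
      have := ih pref (cur ++ [c]) (by simp)
      rw [this]
      simp [pvChunkTail, hm]

-- B's stage-2 fold over the marker-started chunks of t, started at a state whose last
-- chunk ends the already-emitted text with character p, flattens to the pairwise form
theorem join_fold (t : List Char) : ∀ (p : Char) (out : List (List Char)) (cur : List Char),
    cur.getLast? = some p →
    (((pvChunkTail t).2).foldl (fun out chunk =>
        (if (out.getLastD []).getLast? != some ' ' then out ++ [[' ']] else out) ++ [chunk])
      (out ++ [cur ++ (pvChunkTail t).1])).flatten
    = out.flatten ++ cur ++ pvCore p t := by
  induction t with
  | nil => intro p out cur _; simp [pvChunkTail, pvCore]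
  | cons c r ih =>
    intro p out cur hp
    by_cases hm : (c == '#' || c == '@') = true
    · simp only [pvChunkTail, hm, if_true, List.foldl_cons, List.append_nil]
      have hlast : ((out ++ [cur]).getLastD []) = cur := by simp
      rw [hlast, hp]
      by_cases hsp : p = ' '
      · subst hsp
        simp only [bne_self_eq_false, Bool.false_eq_true, if_false]
        have := ih c (out ++ [cur]) [c] (by simp)
        have h2 : (out ++ [cur]) ++ [[c] ++ (pvChunkTail r).1] = out ++ [cur] ++ [c :: (pvChunkTail r).1] := by simp
        rw [h2] at this
        rw [this]
        simp [pvCore, hm]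
      · have hne : (some p != some ' ') = true := by simpa using hsp
        simp only [hne, if_true]
        have := ih c (out ++ [cur] ++ [[' ']]) [c] (by simp)
        have h2 : (out ++ [cur] ++ [[' ']]) ++ [[c] ++ (pvChunkTail r).1] = (out ++ [cur]) ++ [[' ']] ++ [c :: (pvChunkTail r).1] := by simp
        rw [h2] at this
        rw [this]
        simp [pvCore, hm, hsp]
    · simp only [pvChunkTail, hm, Bool.false_eq_true, if_false]
      have := ih c out (cur ++ [c]) (by simp)
      have h2 : out ++ [(cur ++ [c]) ++ (pvChunkTail r).1] = out ++ [cur ++ c :: (pvChunkTail r).1] := by simp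
      rw [h2] at this
      rw [this]
      simp [pvCore, hm]

-- A's fold over the tail's enumeration (starting at index pre.length + 1, indexing into
-- the full list pre ++ p :: s) equals acc ++ pvCore p s
theorem loop_eq (s : List Char) : ∀ (pre : List Char) (p : Char) (a : List Char),
    (PySem.List.enumerate s ((pre.length : Int) + 1)).foldl (fun acc ic =>
        let i := ic.1
        let c := ic.2
        let acc := if (c == '#' || c == '@') && decide (0 < i) then
            (if PySem.List.pyGet? (pre ++ p :: s) (i - 1) ≠ some ' ' then acc ++ [' '] else acc)
          else acc
        acc ++ [c]) a = a ++ pvCore p s := by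
  induction s with
  | nil => intro pre p a; simp [pvCore, PySem.List.enumerate]
  | cons c rest ih =>
    intro pre p a
    rw [PySem.List.enumerate_cons]
    simp only [List.foldl_cons]
    have hget : PySem.List.pyGet? (pre ++ p :: c :: rest) ((pre.length : Int) + 1 - 1)
        = some p := by
      simp
    have hpos : (decide ((0:Int) < (pre.length : Int) + 1)) = true := by
      simp
    have h2 : pre ++ p :: c :: rest = (pre ++ [p]) ++ c :: rest := by simp
    have key : ∀ a' : List Char,
        (PySem.List.enumerate rest ((pre.length : Int) + 1 + 1)).foldl (fun acc ic =>
            let i := ic.1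
            let c' := ic.2
            let acc := if (c' == '#' || c' == '@') && decide (0 < i) then
                (if PySem.List.pyGet? (pre ++ p :: c :: rest) (i - 1) ≠ some ' ' then acc ++ [' '] else acc)
              else acc
            acc ++ [c']) a' = a' ++ pvCore c rest := by
      intro a'
      have h3 := ih (pre ++ [p]) c a'
      rw [← h2] at h3
      have harith : (((pre ++ [p]).length : Int) + 1) = (pre.length : Int) + 1 + 1 := by
        simp only [List.length_append, List.length_cons, List.length_nil]; push_cast; ring
      rw [harith] at h3
      exact h3
    simp only [hget, hpos, Bool.and_true]
    rw [key]
    by_cases hc : (c == '#' || c == '@') = true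
    · by_cases hp : p = ' '
      · subst hp
        simp [pvCore, hc]
      · have hne : some p ≠ some ' ' := by simpa using hp
        simp [pvCore, hc, hp, hne]
    · simp [pvCore, hc]

-- ===== VERDICT (by name: the statement is the Claim_ definition above) =====
theorem addSpacesBetweenHashTags_spec : Claim_equal_addSpacesBetweenHashTags := by
  intro text _
  unfold Spec_addSpacesBetweenHashTags addSpacesBetweenHashTags addSpacesBetweenHashTags_alt
  cases hc : text.toList with
  | nil =>
    have ht : text = "" := String.toList_inj.mp hc
    subst ht
    rfl
  | cons h t =>
    -- A's side: String.mk ([h] ++ pvCore h t)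
    have hlen : (text.length == 0) = false := by
      have h1 : text.length = (h :: t).length := by rw [← hc, String.length_toList]
      simp [h1]
    simp only [hlen, Bool.false_eq_true, if_false]
    rw [PySem.List.enumerate_cons]
    simp only [List.foldl_cons]
    have h0 : (decide ((0:Int) < 0)) = false := by decide
    simp only [h0, Bool.and_false, Bool.false_eq_true, if_false, List.nil_append, zero_add]
    have hA := loop_eq t [] h [h]
    simp only [List.length_nil, Nat.cast_zero, zero_add, List.nil_append] at hA
    -- B's side: same pairwise form via chunk_fold and join_fold
    have hstep1 : (if (h == '#' || h == '@') && ([([] : List Char)].getLastD [] != ([] : List Char)) then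
        [([] : List Char)] ++ [[h]]
      else
        [([] : List Char)].dropLast ++ [[([] : List Char)].getLastD [] ++ [h]]) = [[h]] := by
      simp
    rw [hstep1]
    have hB : (((List.foldl (fun parts c =>
          if (c == '#' || c == '@') && parts.getLastD [] != ([] : List Char) then
            parts ++ [[c]]
          else
            parts.dropLast ++ [parts.getLastD [] ++ [c]]) [[h]] t).tail).foldl
        (fun out chunk =>
          (if (out.getLastD []).getLast? != some ' ' then out ++ [[' ']] else out) ++ [chunk])
        [(List.foldl (fun parts c =>
          if (c == '#' || c == '@') && parts.getLastD [] != ([] : List Char) then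
            parts ++ [[c]]
          else
            parts.dropLast ++ [parts.getLastD [] ++ [c]]) [[h]] t).headD []]).flatten
        = [h] ++ pvCore h t := by
      have hparts := chunk_fold t ([] : List (List Char)) [h] (by simp)
      simp only [List.nil_append] at hparts
      rw [hparts]
      exact join_fold t h ([] : List (List Char)) [h] (by simp)
    exact congrArg String.mk (hA.trans hB.symm)
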